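-- pv_equiv track=rewrite | github.com/pypi-data/pypi-mirror-392 | packages/annize/annize-7.0.6533-py3-none-any.whl/annize/project/inspector.py | __type_documentation__summary
-- ===== SOURCE A (Python) =====
-- def __type_documentation__summary(type_doc: str) -> str:
--     type_doc_lines = type_doc.split("\n")
--     while len(type_doc_lines) > 0 and not type_doc_lines[0].strip():
--         type_doc_lines.pop(0)
--     while len(type_doc_lines) > 0 and not type_doc_lines[-1].strip():
--         type_doc_lines.pop()
--     indent = len(type_doc_lines[0]) - len(type_doc_lines[0].lstrip())
--     return "\n".join(_[indent:] for _ in type_doc_lines)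
-- ===== SOURCE B (Python) =====
-- def __type_documentation__summary(type_doc: str) -> str:
--     lines = type_doc.split("\n")
--     idxs = [i for i, line in enumerate(lines) if line.strip()]
--     if not idxs:
--         return ""
--     first, last = idxs[0], idxs[-1]
--     trimmed = lines[first:last + 1]
--     indent = len(trimmed[0]) - len(trimmed[0].lstrip())
--     return "\n".join(line[indent:] for line in trimmed)
-- ===== Notes on version B (the rewrite author's own statement) =====
-- stated objective: simpler
-- what changed: B replaces A's two destructive while-loops that pop blank lines off each end of the list with a single enumerate pass collecting the indices of non-blank lines and one slice lines[first:last+1] before dedenting; Pre_ excludes the all-blank docstrings, on which A raises IndexError.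
import Mathlib
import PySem

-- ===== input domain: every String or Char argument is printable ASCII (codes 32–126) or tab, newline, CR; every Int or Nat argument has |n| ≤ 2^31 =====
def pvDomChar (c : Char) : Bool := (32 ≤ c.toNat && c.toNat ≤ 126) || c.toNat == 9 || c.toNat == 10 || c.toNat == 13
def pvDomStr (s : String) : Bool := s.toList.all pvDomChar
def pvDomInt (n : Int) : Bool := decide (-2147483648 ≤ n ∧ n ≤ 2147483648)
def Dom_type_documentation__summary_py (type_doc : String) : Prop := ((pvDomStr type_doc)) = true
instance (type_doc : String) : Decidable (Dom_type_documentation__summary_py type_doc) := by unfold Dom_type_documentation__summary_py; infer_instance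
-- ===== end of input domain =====

-- B trims the docstring by computing the first/last non-blank line indices and slicing once,
-- instead of A's two destructive pop-loops; objective: simpler decomposition (no speed claim).

-- ===== PORT A =====
-- shared helper: Python's `not line.strip()` test
def pvBlank (s : String) : Bool := PySem.Str.strip s == ""

-- A's first while loop: pop blank lines off the front
def pvPopFront : List String → List String
  | [] => []
  | h :: t => if pvBlank h then pvPopFront t else h :: t

-- A's second while loop: pop blank lines off the back (checks lines[-1], pops last)
def pvPopBack (l : List String) : List String :=
  if h : l = [] then l
  else if pvBlank (l.getLast h) then pvPopBack l.dropLast else l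
  termination_by l.length
  decreasing_by
    have := List.length_pos_iff.mpr h
    simp [List.length_dropLast]; omega

def type_documentation__summary_py (type_doc : String) : String :=
  let lines := (PySem.Str.split? type_doc "\n").getD []
  let lines2 := pvPopBack (pvPopFront lines)
  match lines2 with
  | [] => ""   -- Python raises IndexError here (lines[0] on the empty list); excluded by Pre_
  | first :: rest =>
    let indent := PySem.Str.len first - PySem.Str.len (PySem.Str.lstrip first)
    PySem.Str.join "\n" ((first :: rest).map (fun line => PySem.Str.slice line (some indent) none))

-- ===== PORT B =====
-- B's comprehension: indices of the non-blank lines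
def pvIdxs (lines : List String) : List Int :=
  (PySem.List.enumerate lines).filterMap (fun p => if pvBlank p.2 then none else some p.1)

def type_documentation__summary_py_alt (type_doc : String) : String :=
  let lines := (PySem.Str.split? type_doc "\n").getD []
  match pvIdxs lines with
  | [] => ""
  | i0 :: irest =>
    let last := (i0 :: irest).getLast (by simp)
    let trimmed := PySem.List.slice lines (some i0) (some (last + 1))
    let hd := trimmed.headD ""
    let indent := PySem.Str.len hd - PySem.Str.len (PySem.Str.lstrip hd)
    PySem.Str.join "\n" (trimmed.map (fun line => PySem.Str.slice line (some indent) none))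

-- ===== PRECONDITION & SPEC =====
-- Pre_ excludes exactly the all-blank docstrings (every line is whitespace), on which
-- Python A raises IndexError at `type_doc_lines[0]`.
def Pre_type_documentation__summary_py (type_doc : String) : Prop :=
  ∃ line ∈ (PySem.Str.split? type_doc "\n").getD [], PySem.Str.strip line ≠ ""
instance (type_doc : String) : Decidable (Pre_type_documentation__summary_py type_doc) := by
  unfold Pre_type_documentation__summary_py; infer_instance
def pvWitness_type_documentation__summary_py : String := " x "

def Spec_type_documentation__summary_py (type_doc : String) (out : String) : Prop :=
  out = type_documentation__summary_py_alt type_doc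
instance (type_doc : String) (out : String) : Decidable (Spec_type_documentation__summary_py type_doc out) := by
  unfold Spec_type_documentation__summary_py; infer_instance

-- ===== CLAIM =====
def Claim_equal_type_documentation__summary_py : Prop :=
  ∀ (type_doc : String), Dom_type_documentation__summary_py type_doc →
    Pre_type_documentation__summary_py type_doc →
    Spec_type_documentation__summary_py type_doc (type_documentation__summary_py type_doc)

-- ===== LEMMAS AND PROOFS =====

-- Nat-indexed version of pvIdxs used only in the proofs
def pvG (p : String → Bool) : List String → Nat → List Nat
  | [], _ => []
  | h :: t, s => (if p h then [] else [s]) ++ pvG p t (s + 1)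

lemma pvG_shift (p : String → Bool) (l : List String) (s : Nat) :
    pvG p l s = (pvG p l 0).map (· + s) := by
  induction l generalizing s with
  | nil => simp [pvG]
  | cons h t ih =>
    simp only [pvG, List.map_append]
    congr 1
    · by_cases hp : p h <;> simp [hp]
    · rw [ih (s+1), ih 1, List.map_map]
      congr 1; funext x; simp; omega

lemma pvIdxs_eq (l : List String) (s : Nat) :
    (PySem.List.enumerate l (s : Int)).filterMap (fun p => if pvBlank p.2 then none else some p.1)
      = (pvG pvBlank l s).map (Nat.cast) := by
  induction l generalizing s with
  | nil => simp [pvG, PySem.List.enumerate]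
  | cons h t ih =>
    rw [PySem.List.enumerate_cons]
    have : ((s : Int) + 1) = ((s + 1 : Nat) : Int) := by push_cast; ring
    rw [List.filterMap_cons, this, ih (s+1)]
    by_cases hp : pvBlank h <;> simp [hp, pvG]

lemma pvG_nil_iff (p : String → Bool) (l : List String) (s : Nat) :
    pvG p l s = [] ↔ ∀ x ∈ l, p x = true := by
  induction l generalizing s with
  | nil => simp [pvG]
  | cons h t ih =>
    by_cases hp : p h <;> simp [pvG, hp, ih]

lemma pvPopFront_eq (l : List String) : pvPopFront l = l.dropWhile pvBlank := by
  induction l with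
  | nil => rfl
  | cons h t ih =>
    by_cases hp : pvBlank h <;> simp [pvPopFront, hp, ih]

lemma pvPopBack_eq (l : List String) :
    pvPopBack l = (l.reverse.dropWhile pvBlank).reverse := by
  induction l using List.reverseRecOn with
  | nil => rw [pvPopBack]; simp
  | append_singleton t a ih =>
    rw [pvPopBack]
    have hne : t ++ [a] ≠ [] := by simp
    rw [dif_neg hne]
    rw [List.getLast_append_singleton, List.dropLast_concat, List.reverse_append]
    by_cases hp : pvBlank a <;> simp [hp, ih]

-- the back trim as a take at the last non-blank index
lemma pvTakeLast (p : String → Bool) :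
    ∀ (t : List String) (i : Nat) (rest : List Nat) (j : Nat),
      pvG p t 0 = i :: rest → (i :: rest).getLast? = some j →
      (t.reverse.dropWhile p).reverse = t.take (j + 1) := by
  intro t
  induction t with
  | nil => intro i rest j h; simp [pvG] at h
  | cons h t ih =>
    intro i rest j hG hj
    rw [show pvG p (h :: t) 0 = (if p h then [] else [0]) ++ pvG p t 1 from rfl,
        pvG_shift p t 1] at hG
    cases hGt : pvG p t 0 with
    | nil =>
      have hall : ∀ x ∈ t, p x = true := (pvG_nil_iff p t 0).mp hGt
      rw [hGt] at hG
      by_cases hp : p h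
      · simp [hp] at hG
      · simp [hp] at hG
        obtain ⟨hi, hrest⟩ := hG
        subst hi; subst hrest
        simp at hj; subst hj
        have hdt : t.reverse.dropWhile p = [] :=
          List.dropWhile_eq_nil_iff.mpr (by intro x hx; exact hall x (List.mem_reverse.mp hx))
        simp [List.reverse_cons, List.dropWhile_append, hdt, hp]
    | cons a b =>
      have hj0 : (a :: b).getLast? = some ((a :: b).getLast (by simp)) :=
        List.getLast?_eq_getLast _
      set j0 := (a :: b).getLast (by simp) with hj0def
      have ihx := ih a b j0 hGt hj0
      have hne : t.reverse.dropWhile p ≠ [] := by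
        intro hnil
        have hall := List.dropWhile_eq_nil_iff.mp hnil
        have : pvG p t 0 = [] := (pvG_nil_iff p t 0).mpr
          (fun x hx => hall x (List.mem_reverse.mpr hx))
        rw [this] at hGt; simp at hGt
      have htrim : ((h :: t).reverse.dropWhile p).reverse = h :: t.take (j0 + 1) := by
        rw [List.reverse_cons, List.dropWhile_append]
        rw [if_neg (by simpa using hne)]
        rw [List.reverse_append]
        simp [ihx]
      -- identify j
      have hmapLast : ((a :: b).map (· + 1)).getLast? = some (j0 + 1) := by
        rw [List.getLast?_map, hj0]; rfl
      have hjval : j = j0 + 1 := by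
        rw [hGt] at hG
        by_cases hp : p h
        · simp only [hp, if_true, List.nil_append] at hG
          rw [hG, hj] at hmapLast
          exact Option.some_inj.mp hmapLast
        · simp only [hp, if_false, Bool.false_eq_true] at hG
          obtain ⟨hi, hrest⟩ := List.cons.inj (by simpa using hG)
          rw [← hi, ← hrest, List.getLast?_cons_cons] at hj
          simp only [List.map_cons] at hmapLast
          rw [hj] at hmapLast
          exact Option.some_inj.mp hmapLast
      rw [htrim, hjval]
      rfl

lemma pvMain (p : String → Bool) :
    ∀ (l : List String) (i : Nat) (rest : List Nat) (j : Nat),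
      pvG p l 0 = i :: rest → (i :: rest).getLast? = some j →
      PySem.List.slice l (some (i : Int)) (some ((j : Int) + 1))
        = ((l.dropWhile p).reverse.dropWhile p).reverse := by
  intro l
  induction l with
  | nil => intro i rest j h; simp [pvG] at h
  | cons h t ih =>
    intro i rest j hG hj
    by_cases hp : p h
    · rw [show pvG p (h :: t) 0 = (if p h then [] else [0]) ++ pvG p t 1 from rfl,
          pvG_shift p t 1] at hG
      simp only [hp, if_true, List.nil_append] at hG
      cases hGt : pvG p t 0 with
      | nil => rw [hGt] at hG; simp at hG
      | cons a b =>
        rw [hGt] at hG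
        obtain ⟨hi, hrest⟩ := List.cons.inj (by simpa using hG)
        have hj0 : (a :: b).getLast? = some ((a :: b).getLast (by simp)) :=
          List.getLast?_eq_getLast _
        set j0 := (a :: b).getLast (by simp) with hj0def
        have hmapLast : ((a :: b).map (· + 1)).getLast? = some (j0 + 1) := by
          rw [List.getLast?_map, hj0]; rfl
        have hjval : j = j0 + 1 := by
          rw [hG, hj] at hmapLast
          exact Option.some_inj.mp hmapLast
        have ihx := ih a b j0 hGt hj0
        rw [← hi, hjval]
        have c1 : (((j0 + 1 : Nat)) : Int) + 1 = (((j0 + 2 : Nat)) : Int) := by push_cast; ring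
        have c4 : ((j0 : Nat) : Int) + 1 = (((j0 + 1 : Nat)) : Int) := by push_cast; ring
        rw [c4, PySem.List.slice_natCast] at ihx
        rw [c1, PySem.List.slice_natCast]
        rw [List.drop_succ_cons]
        have c3 : j0 + 2 - (a + 1) = j0 + 1 - a := by omega
        rw [c3, ihx]
        simp [hp]
    · have hi0 : i = 0 := by
        rw [show pvG p (h :: t) 0 = (if p h then [] else [0]) ++ pvG p t 1 from rfl] at hG
        simp only [hp, if_false, Bool.false_eq_true, List.cons_append, List.nil_append] at hG
        exact (List.cons.inj hG).1.symm
      subst hi0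
      have c1 : ((0 : Nat) : Int) = (0 : Int) := by norm_num
      have c2 : ((j : Nat) : Int) + 1 = (((j + 1 : Nat)) : Int) := by push_cast; ring
      rw [c1, c2, PySem.List.slice_zero_start, PySem.List.slice_to_natCast]
      have hdw : (h :: t).dropWhile p = h :: t := by simp [hp]
      rw [hdw]
      exact (pvTakeLast p (h :: t) 0 rest j hG hj).symm

lemma ports_eq (type_doc : String) :
    type_documentation__summary_py type_doc = type_documentation__summary_py_alt type_doc := by
  simp only [type_documentation__summary_py, type_documentation__summary_py_alt]
  set lines := (PySem.Str.split? type_doc "\n").getD [] with hl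
  have hA : pvPopBack (pvPopFront lines)
      = ((lines.dropWhile pvBlank).reverse.dropWhile pvBlank).reverse := by
    rw [pvPopFront_eq, pvPopBack_eq]
  have hIdx : pvIdxs lines = (pvG pvBlank lines 0).map Nat.cast := by
    have h0 := pvIdxs_eq lines 0
    simpa [pvIdxs] using h0
  cases hG : pvG pvBlank lines 0 with
  | nil =>
    have hall : ∀ x ∈ lines, pvBlank x = true := (pvG_nil_iff pvBlank lines 0).mp hG
    have hdw : lines.dropWhile pvBlank = [] := List.dropWhile_eq_nil_iff.mpr hall
    rw [hIdx, hG, hA, hdw]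
    simp
  | cons a b =>
    have hj0 : (a :: b).getLast? = some ((a :: b).getLast (by simp)) :=
      List.getLast?_eq_getLast _
    set j0 := (a :: b).getLast (by simp) with hj0def
    have hlastCast : ((a :: b).map (Nat.cast (R := Int))).getLast? = some ((j0 : Int)) := by
      rw [List.getLast?_map, hj0]; rfl
    have hslice : PySem.List.slice lines (some ((a : Nat) : Int)) (some (((j0 : Nat) : Int) + 1))
        = ((lines.dropWhile pvBlank).reverse.dropWhile pvBlank).reverse :=
      pvMain pvBlank lines a b j0 hG hj0
    -- the trimmed list is nonempty
    have hne : ((lines.dropWhile pvBlank).reverse.dropWhile pvBlank).reverse ≠ [] := by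
      have hdw : lines.dropWhile pvBlank ≠ [] := by
        intro hnil
        have : pvG pvBlank lines 0 = [] :=
          (pvG_nil_iff pvBlank lines 0).mpr (List.dropWhile_eq_nil_iff.mp hnil)
        rw [this] at hG; simp at hG
      have hhead := List.head_dropWhile_not pvBlank hdw
      intro hnil
      rw [List.reverse_eq_nil_iff] at hnil
      have hall := List.dropWhile_eq_nil_iff.mp hnil
      have hmem : (lines.dropWhile pvBlank).head hdw ∈ (lines.dropWhile pvBlank).reverse :=
        List.mem_reverse.mpr (List.head_mem hdw)
      rw [hall _ hmem] at hhead
      exact Bool.noConfusion hhead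
    rw [hIdx, hG, hA]
    obtain ⟨f, r, htrim⟩ := List.exists_cons_of_ne_nil hne
    rw [htrim]
    simp only [List.map_cons]
    -- reduce B's getLast on the literal cons list
    have hlast : ((a : Int) :: (b.map (Nat.cast (R := Int)))).getLast (by simp) = ((j0 : Nat) : Int) := by
      apply Option.some_injective
      rw [← List.getLast?_eq_getLast]
      rw [← List.map_cons] at *
      exact hlastCast
    rw [hlast]
    rw [hslice, htrim]
    rfl

-- ===== VERDICT =====
theorem type_documentation__summary_py_spec : Claim_equal_type_documentation__summary_py := by
  intro td _ _
  unfold Spec_type_documentation__summary_py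
  exact ports_eq td
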